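-- pv_equiv track=rewrite | github.com/Timmichi/ICSearch-Engine | TextAcquisition.py | convertIndexToAlphaIndex
-- ===== SOURCE A (Python) =====
-- def convertIndexToAlphaIndex(index):
--     alphaIndex = {}
--     for k, v in index.items():
--         key = k[0]
--         if key in alphaIndex.keys():
--             alphaIndex[key][k] = v
--         else:
--             alphaIndex[key] = {}
--             alphaIndex[key][k] = v
--     return alphaIndex
-- ===== SOURCE B (Python) =====
-- def convertIndexToAlphaIndex(index):
--     items = list(index.items())
--     firsts = list(dict.fromkeys(k[0] for k, _ in items))
--     return {c: {k: v for k, v in items if k[0] == c} for c in firsts}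
-- ===== Notes on version B (the rewrite author's own statement) =====
-- stated objective: simpler
-- what changed: Replaces A's incremental loop that mutates a nested dict entry by entry with two declarative passes: an ordered dedup (dict.fromkeys) of the keys' first characters, then one dict comprehension filtering the items per first character.
import Mathlib
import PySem

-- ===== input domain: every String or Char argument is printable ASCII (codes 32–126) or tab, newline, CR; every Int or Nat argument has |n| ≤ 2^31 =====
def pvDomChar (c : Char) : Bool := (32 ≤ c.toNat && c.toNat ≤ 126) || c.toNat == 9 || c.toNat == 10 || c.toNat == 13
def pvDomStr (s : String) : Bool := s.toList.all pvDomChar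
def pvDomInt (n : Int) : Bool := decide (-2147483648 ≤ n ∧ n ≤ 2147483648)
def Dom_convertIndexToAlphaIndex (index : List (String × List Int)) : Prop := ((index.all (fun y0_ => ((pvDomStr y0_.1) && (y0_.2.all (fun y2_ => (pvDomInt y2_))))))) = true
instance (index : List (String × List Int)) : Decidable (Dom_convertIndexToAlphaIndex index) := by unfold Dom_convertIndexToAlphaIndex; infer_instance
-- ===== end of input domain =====

-- B replaces A's incremental nested-dict accumulation by two declarative passes (ordered
-- dedup of first characters, then one filter per group); objective: simpler, same cost class.

-- ===== PORT A =====
-- A: for each (k, v), key = k[0]; insert v under alphaIndex[key][k], creating the inner dict on demand.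
def convertIndexToAlphaIndex (index : List (String × List Int)) : List (String × List (String × List Int)) :=
  let alpha : PySem.Dict String (PySem.Dict String (List Int)) :=
    index.foldl (fun alpha kv =>
      match PySem.Str.pyGet? kv.1 0 with
      | none => alpha   -- k[0] on an empty key: IndexError (excluded by Pre_)
      | some c =>
        let key := String.ofList [c]
        if alpha.contains key then
          alpha.modify key PySem.Dict.empty (fun inner => inner.insert kv.1 kv.2)
        else
          -- alphaIndex[key] = {}; alphaIndex[key][k] = v
          (alpha.insert key PySem.Dict.empty).modify key PySem.Dict.empty
            (fun inner => inner.insert kv.1 kv.2))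
      PySem.Dict.empty
  alpha.items.map (fun p => (p.1, p.2.items))

-- ===== PORT B =====
-- k[0] as a one-character string (the keys admitted by Pre_ are nonempty)
def pvFirst (s : String) : String := String.ofList (s.toList.take 1)

def convertIndexToAlphaIndex_alt (index : List (String × List Int)) : List (String × List (String × List Int)) :=
  let firsts := PySem.List.dedup (index.map (fun kv => pvFirst kv.1))
  firsts.map (fun c => (c, index.filter (fun kv => pvFirst kv.1 == c)))

-- ===== PRECONDITION & SPEC =====
-- Pre_ excludes inputs containing an empty-string key, on which A raises IndexError at k[0],
-- and association lists with two equal keys, which encode no Python dict (index is a dict).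
def Pre_convertIndexToAlphaIndex (index : List (String × List Int)) : Prop :=
  (∀ kv ∈ index, kv.1 ≠ "") ∧ (index.map (fun kv => kv.1)).Nodup
instance (index : List (String × List Int)) : Decidable (Pre_convertIndexToAlphaIndex index) := by unfold Pre_convertIndexToAlphaIndex; infer_instance

def pvWitness_convertIndexToAlphaIndex : (List (String × List Int)) :=
  [("apple", [1, 3]), ("ant", [2]), ("bee", [4])]

def Spec_convertIndexToAlphaIndex (index : List (String × List Int)) (out : List (String × List (String × List Int))) : Prop := out = convertIndexToAlphaIndex_alt index
instance (index : List (String × List Int)) (out : List (String × List (String × List Int))) : Decidable (Spec_convertIndexToAlphaIndex index out) := by unfold Spec_convertIndexToAlphaIndex; infer_instance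

-- ===== CLAIM (what is proved, stated in full; the proofs are below) =====
def Claim_equal_convertIndexToAlphaIndex : Prop := ∀ (index : List (String × List Int)), Dom_convertIndexToAlphaIndex index → Pre_convertIndexToAlphaIndex index → Spec_convertIndexToAlphaIndex index (convertIndexToAlphaIndex index)

-- ===== LEMMAS AND PROOFS =====

-- A's loop step, rewritten with the key function pvFirst (valid on nonempty keys).
def pvStep (alpha : PySem.Dict String (PySem.Dict String (List Int)))
    (kv : String × List Int) : PySem.Dict String (PySem.Dict String (List Int)) :=
  alpha.modify (pvFirst kv.1) PySem.Dict.empty (fun inner => inner.insert kv.1 kv.2)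

lemma pvFirst_of_ne (s : String) (h : s ≠ "") :
    PySem.Str.pyGet? s 0 = some (s.toList.headI) ∧ pvFirst s = String.ofList [s.toList.headI] := by
  have hl : s.toList ≠ [] := by
    intro hnil
    exact h (by cases s; simp_all)
  cases hcl : s.toList with
  | nil => exact absurd hcl hl
  | cons c rest =>
    constructor
    · have h0 : ((0 : Nat) : Int) = 0 := rfl
      rw [← h0, PySem.Str.pyGet?_natCast, hcl]
      rfl
    · simp [pvFirst, hcl]

lemma pvStep_eq (alpha : PySem.Dict String (PySem.Dict String (List Int)))
    (kv : String × List Int) (h : kv.1 ≠ "") :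
    (match PySem.Str.pyGet? kv.1 0 with
      | none => alpha
      | some c =>
        let key := String.ofList [c]
        if alpha.contains key then
          alpha.modify key PySem.Dict.empty (fun inner => inner.insert kv.1 kv.2)
        else
          (alpha.insert key PySem.Dict.empty).modify key PySem.Dict.empty
            (fun inner => inner.insert kv.1 kv.2)) = pvStep alpha kv := by
  obtain ⟨h1, h2⟩ := pvFirst_of_ne kv.1 h
  rw [h1]
  simp only [← h2, pvStep]
  split_ifs with hc
  · rfl
  · -- key absent: insert {} then set = direct modify
    simp [PySem.Dict.modify, PySem.Dict.getD_insert_self, PySem.Dict.insert_insert_self,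
      PySem.Dict.getD_of_not_contains _ _ (by simpa using hc)]

lemma pvGetD_fold (l : List (String × List Int))
    (d : PySem.Dict String (PySem.Dict String (List Int))) (c : String) :
    (l.foldl pvStep d).getD c PySem.Dict.empty =
      (l.filter (fun kv => pvFirst kv.1 == c)).foldl
        (fun inner kv => inner.insert kv.1 kv.2) (d.getD c PySem.Dict.empty) := by
  induction l generalizing d with
  | nil => rfl
  | cons p t ih =>
    simp only [List.foldl_cons, List.filter_cons]
    by_cases hp : pvFirst p.1 = c
    · simp only [hp, beq_self_eq_true, if_true, List.foldl_cons, ih,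
        pvStep, PySem.Dict.getD_modify]
    · have hb : (pvFirst p.1 == c) = false := by simpa using hp
      simp only [hb, Bool.false_eq_true, if_false, ih, pvStep, PySem.Dict.getD_modify]
      rw [if_neg (fun hcc => hp hcc.symm)]

lemma pvInner_items (l : List (String × List Int))
    (hnd : (l.map (fun kv => kv.1)).Nodup) :
    ((l.foldl (fun inner kv => inner.insert kv.1 kv.2)
        (PySem.Dict.empty : PySem.Dict String (List Int)))).items = l := by
  have := PySem.Dict.items_foldl_insert_fresh
    l (fun kv => kv.1) (fun kv => kv.2)
    PySem.Dict.empty (fun a _ => PySem.Dict.contains_empty _) hnd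
  rw [this]
  show [] ++ _ = _
  rw [List.nil_append]
  exact List.map_id' _

-- ===== VERDICT (by name: the statement is the Claim_ definition above) =====
theorem convertIndexToAlphaIndex_spec : Claim_equal_convertIndexToAlphaIndex := by
  intro index _ hpre
  obtain ⟨hne, hnd⟩ := hpre
  unfold Spec_convertIndexToAlphaIndex convertIndexToAlphaIndex convertIndexToAlphaIndex_alt
  simp only []
  rw [PySem.List.foldl_congr_mem _ _ pvStep _ (fun acc kv hkv => pvStep_eq acc kv (hne kv hkv))]
  have hkeys : (index.foldl pvStep PySem.Dict.empty).keys =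
      PySem.Set.ofList (index.map (fun kv => pvFirst kv.1)) := by
    have := PySem.Dict.keys_foldl_modify_key index (fun kv => pvFirst kv.1)
      (PySem.Dict.empty : PySem.Dict String (List Int))
      (fun _ kv => (fun inner => inner.insert kv.1 kv.2)) PySem.Dict.empty
    simpa [pvStep, PySem.Dict.keys_empty, PySem.Set.update_nil_left] using this
  have hknd : (index.foldl pvStep PySem.Dict.empty).keys.Nodup := by
    rw [hkeys]; exact PySem.Set.nodup_ofList _
  rw [PySem.Dict.items_eq_map_keys _ hknd PySem.Dict.empty, hkeys,
    PySem.List.dedup_eq_ofList, List.map_map]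
  refine List.map_congr_left (fun c _ => ?_)
  simp only [Function.comp_apply]
  rw [pvGetD_fold, PySem.Dict.getD_empty,
    pvInner_items _ ((List.filter_sublist.map _).nodup hnd)]
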